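-- pv_equiv track=rewrite | github.com/Normalist-K/algorithm | study/hustar2/bracket.py | solution
-- ===== SOURCE A (Python) =====
-- def chk(u):
--     stack = []
--     for s in u:
--         if s == '(':
--             stack.append(s)
--         elif s == ')':
--             if stack == []:
--                 return False
--             stack.pop()
--     return True
--
-- def solution(p):
--
--     if p == '':
--         return p
--
--     chk_count = 0
--     idx = 0
--
--     for idx, bracket in enumerate(p):
--         if bracket == '(':
--             chk_count += 1
--         elif bracket == ')':
--             chk_count -= 1
--
--         if chk_count == 0:
--             break
--
--     u, v = p[:idx+1], p[idx+1:]
--     new_v = solution(v)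
--
--     if chk(u):
--         answer = u + new_v
--     else:
--         answer = '(' + new_v + ')'
--         if len(u) > 2:
--             for bracket in u[1:-1]:
--                 if bracket == '(':
--                     answer += ')'
--                 else:
--                     answer += '('
--
--     return answer
-- ===== SOURCE B (Python) =====
-- def solution(p):
--     # Iterative single pass: split p into chunks at the first point where the
--     # running bracket balance returns to 0, collect prefix/suffix fragments,
--     # join once at the end (no recursion, no quadratic string concatenation).
--     pre = []
--     post = []
--     i = 0
--     n = len(p)
--     while i < n:
--         bal = 0
--         neg = False
--         j = i
--         while j < n:
--             c = p[j]
--             if c == '(':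
--                 bal += 1
--             elif c == ')':
--                 bal -= 1
--                 if bal < 0:
--                     neg = True
--             j += 1
--             if bal == 0:
--                 break
--         u = p[i:j]
--         if not neg:
--             pre.append(u)
--         else:
--             pre.append('(')
--             post.append(')' + ''.join(')' if c == '(' else '(' for c in u[1:-1]))
--         i = j
--     return ''.join(pre) + ''.join(reversed(post))
-- ===== Notes on version B (the rewrite author's own statement) =====
-- stated objective: faster
-- what changed: Replaces A's recursion with per-level string rebuilding (and a separate chk() re-scan of each chunk) by a single iterative pass that splits the input into balance-zero chunks while tracking a went-negative flag, collects prefix/suffix fragments in lists, and joins them once at the end.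
import Mathlib
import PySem

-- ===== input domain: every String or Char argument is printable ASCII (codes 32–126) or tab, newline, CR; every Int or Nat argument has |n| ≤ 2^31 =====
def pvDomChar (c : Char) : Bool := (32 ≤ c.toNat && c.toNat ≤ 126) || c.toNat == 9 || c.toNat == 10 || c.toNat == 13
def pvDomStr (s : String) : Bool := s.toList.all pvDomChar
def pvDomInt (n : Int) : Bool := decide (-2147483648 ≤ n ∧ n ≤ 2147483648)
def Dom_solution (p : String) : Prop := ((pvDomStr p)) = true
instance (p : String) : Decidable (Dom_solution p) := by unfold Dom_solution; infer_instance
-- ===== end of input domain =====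

-- B replaces A's recursion (repeated string rebuilding) by one iterative pass that
-- splits the string into balance-zero chunks, collects prefix/suffix fragments and joins once.

-- ===== PORT A =====
-- chk(u): stack-based scan; append/pop at the same end, modelled by cons/tail
def chkAux : List Char → List Char → Bool
  | _, [] => true
  | stack, s :: r =>
    if s = '(' then chkAux ('(' :: stack) r
    else if s = ')' then
      match stack with
      | [] => false
      | _ :: st => chkAux st r
    else chkAux stack r

-- the 'for idx, bracket in enumerate(p): … if chk_count == 0: break' loop:
-- returns the value of idx when the loop stops (break, or natural end at the last char)
def enumLoop : List Char → Int → Nat → Nat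
  | [], _, idx => idx
  | [c], cnt, idx =>
    -- last iteration: idx stays whether or not the break fires
    let _ := if c = '(' then cnt + 1 else if c = ')' then cnt - 1 else cnt
    idx
  | c :: d :: rest, cnt, idx =>
    let cnt' := if c = '(' then cnt + 1 else if c = ')' then cnt - 1 else cnt
    if cnt' = 0 then idx else enumLoop (d :: rest) cnt' (idx + 1)

def solA : List Char → List Char
  | [] => []
  | c :: t =>
    let idx := enumLoop (c :: t) 0 0
    let u := (c :: t).take (idx + 1)
    let v := (c :: t).drop (idx + 1)
    let new_v := solA v
    if chkAux [] u then u ++ new_v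
    else
      let answer := '(' :: (new_v ++ [')'])
      if 2 < u.length then
        -- u[1:-1]: exact for the nonempty u produced here (drop first, drop last)
        ((u.drop 1).dropLast).foldl (fun a x => a ++ [if x = '(' then ')' else '(']) answer
      else answer
termination_by p => p.length
decreasing_by simp only [List.length_drop, List.length_cons]; omega

def solution (p : String) : String := String.ofList (solA p.toList)

-- ===== PORT B =====
-- inner while loop of Source B: advances j, tracks the balance and the went-negative flag
def innerB : List Char → Int → Bool → Nat → Nat × Bool
  | [], _, neg, j => (j, neg)
  | c :: rest, bal, neg, j =>
    let bal' := if c = '(' then bal + 1 else if c = ')' then bal - 1 else bal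
    let neg' := if c = '(' then neg else if c = ')' then (if bal' < 0 then true else neg) else neg
    if bal' = 0 then (j + 1, neg') else innerB rest bal' neg' (j + 1)

-- proof-side chunk splitter: (chunk, rest, went-negative flag) for one balance-zero chunk;
-- stated here because loopB's termination proof cites innerB_fst_lt below
def sp : List Char → Int → List Char × List Char × Bool
  | [], _ => ([], [], false)
  | c :: r, bal =>
    let bal' := if c = '(' then bal + 1 else if c = ')' then bal - 1 else bal
    let ng := if c = '(' then false else if c = ')' then decide (bal' < 0) else false
    if bal' = 0 then ([c], r, ng)
    else
      let t := sp r bal'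
      (c :: t.1, t.2.1, ng || t.2.2)

theorem sp_fst_len_pos (c : Char) (r : List Char) (bal : Int) :
    0 < (sp (c :: r) bal).1.length := by
  simp only [sp]
  split_ifs <;> simp

theorem innerB_eq : ∀ (l : List Char) (bal : Int) (neg : Bool) (j : Nat),
    innerB l bal neg j = (j + (sp l bal).1.length, neg || (sp l bal).2.2) := by
  intro l
  induction l with
  | nil => intro bal neg j; simp [innerB, sp]
  | cons c r ih =>
    intro bal neg j
    simp only [innerB, sp]
    split_ifs <;>
      simp only [ih, Prod.mk.injEq] <;>
      constructor <;>
      first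
        | omega
        | (cases neg <;> simp <;> try omega)

theorem innerB_fst_lt (c : Char) (t : List Char) (bal : Int) (neg : Bool) (j : Nat) :
    j < (innerB (c :: t) bal neg j).1 := by
  rw [innerB_eq]
  have := sp_fst_len_pos c t bal
  simp; omega

-- ')' if x == '(' else '('
def flipc (x : Char) : Char := if x = '(' then ')' else '('

-- outer while loop of Source B over the chunks, accumulating pre and post
def loopB : List Char → List (List Char) → List (List Char) → List (List Char) × List (List Char)
  | [], pre, post => (pre, post)
  | c :: t, pre, post =>
    let r := innerB (c :: t) 0 false 0
    let u := (c :: t).take r.1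
    let rest := (c :: t).drop r.1
    if r.2 then
      loopB rest (pre ++ [['(']]) (post ++ [')' :: ((u.drop 1).dropLast).map flipc])
    else
      loopB rest (pre ++ [u]) post
termination_by l => l.length
decreasing_by
  all_goals
    have h := innerB_fst_lt c t 0 false 0
    simp only [List.length_drop, List.length_cons]
    omega

def solB (l : List Char) : List Char :=
  let r := loopB l [] []
  r.1.flatten ++ r.2.reverse.flatten

def solution_alt (p : String) : String := String.ofList (solB p.toList)

-- ===== PRECONDITION & SPEC =====
def Spec_solution (p : String) (out : String) : Prop := out = solution_alt p
instance (p : String) (out : String) : Decidable (Spec_solution p out) := by unfold Spec_solution; infer_instance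

-- ===== CLAIM (what is proved, stated in full; the proofs are below) =====
def Claim_equal_solution : Prop := ∀ (p : String), Dom_solution p → Spec_solution p (solution p)

-- ===== LEMMAS AND PROOFS =====

theorem sp_append : ∀ (l : List Char) (bal : Int), (sp l bal).1 ++ (sp l bal).2.1 = l := by
  intro l
  induction l with
  | nil => intro bal; simp [sp]
  | cons c r ih =>
    intro bal
    simp only [sp]
    split_ifs <;> simp [ih]

theorem enum_shift : ∀ (l : List Char) (bal : Int) (i : Nat),
    enumLoop l bal i = i + enumLoop l bal 0 := by
  intro l
  induction l with
  | nil => intro bal i; simp [enumLoop]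
  | cons c r ih =>
    intro bal i
    cases r with
    | nil => simp [enumLoop]
    | cons d t =>
      simp only [enumLoop]
      split_ifs <;>
        first
          | omega
          | (rw [ih _ (i + 1), ih _ (0 + 1)]; omega)

theorem enum_eq : ∀ (l : List Char) (bal : Int), l ≠ [] →
    enumLoop l bal 0 + 1 = (sp l bal).1.length := by
  intro l
  induction l with
  | nil => intro _ h; exact absurd rfl h
  | cons c r ih =>
    intro bal _
    simp only [sp]
    cases r with
    | nil => simp [enumLoop, sp]
    | cons d t =>
      simp only [enumLoop]
      split_ifs <;>
        first
          | (simp; done)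
          | (rw [enum_shift]
             simp only [List.length_cons, ← ih _ (List.cons_ne_nil d t)]
             omega)

-- chk's result depends only on the stack length
def chkN : Nat → List Char → Bool
  | _, [] => true
  | n, s :: r =>
    if s = '(' then chkN (n + 1) r
    else if s = ')' then
      match n with
      | 0 => false
      | m + 1 => chkN m r
    else chkN n r

theorem chkAux_eq_chkN : ∀ (l stack : List Char), chkAux stack l = chkN stack.length l := by
  intro l
  induction l with
  | nil => intro stack; simp [chkAux, chkN]
  | cons s r ih =>
    intro stack
    simp only [chkAux, chkN]
    split_ifs
    · simpa using ih ('(' :: stack)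
    · cases stack with
      | nil => rfl
      | cons a st => simpa using ih st
    · exact ih stack

theorem chk_sp : ∀ (l : List Char) (bal : Int), 0 ≤ bal →
    chkN bal.toNat (sp l bal).1 = !(sp l bal).2.2 := by
  intro l
  induction l with
  | nil => intro bal _; simp [sp, chkN]
  | cons c r ih =>
    intro bal hbal
    by_cases hc : c = '('
    · subst hc
      have hz : ¬(bal + 1 = 0) := by omega
      have h1 : (sp ('(' :: r) bal).1 = '(' :: (sp r (bal + 1)).1 := by simp [sp, hz]
      have h3 : (sp ('(' :: r) bal).2.2 = (sp r (bal + 1)).2.2 := by simp [sp, hz]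
      have ht : (bal + 1).toNat = bal.toNat + 1 := by omega
      have hstep : chkN bal.toNat ('(' :: (sp r (bal + 1)).1)
          = chkN (bal.toNat + 1) (sp r (bal + 1)).1 := by simp [chkN]
      rw [h1, h3, hstep, ← ht]
      exact ih (bal + 1) (by omega)
    · by_cases hc2 : c = ')'
      · subst hc2
        by_cases hz : bal - 1 = 0
        · have hb : bal = 1 := by omega
          subst hb
          simp [sp, chkN]
        · by_cases hb0 : bal = 0
          · subst hb0
            simp [sp, chkN]
          · have hge : ¬(bal - 1 < 0) := by omega
            have h1 : (sp (')' :: r) bal).1 = ')' :: (sp r (bal - 1)).1 := by simp [sp, hz]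
            have h3 : (sp (')' :: r) bal).2.2 = (sp r (bal - 1)).2.2 := by
              simp [sp, hz, hge]
            have ht : bal.toNat = (bal - 1).toNat + 1 := by omega
            have hstep : chkN ((bal - 1).toNat + 1) (')' :: (sp r (bal - 1)).1)
                = chkN ((bal - 1).toNat) (sp r (bal - 1)).1 := by simp [chkN]
            rw [h1, h3, ht, hstep]
            exact ih (bal - 1) (by omega)
      · by_cases hz : bal = 0
        · subst hz
          simp [sp, chkN, hc, hc2]
        · have h1 : (sp (c :: r) bal).1 = c :: (sp r bal).1 := by simp [sp, hz, hc, hc2]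
          have h3 : (sp (c :: r) bal).2.2 = (sp r bal).2.2 := by simp [sp, hz, hc, hc2]
          have hstep : chkN bal.toNat (c :: (sp r bal).1)
              = chkN bal.toNat (sp r bal).1 := by simp [chkN, hc, hc2]
          rw [h1, h3, hstep]
          exact ih bal hbal

theorem mid_nil {u : List Char} (h : u.length ≤ 2) : (u.drop 1).dropLast = [] := by
  have h0 : ((u.drop 1).dropLast).length = 0 := by
    simp [List.length_dropLast]; omega
  exact List.eq_nil_of_length_eq_zero h0

-- A's result in closed chunk form
theorem solA_cons (c : Char) (t : List Char) :
    solA (c :: t) =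
      (if !(sp (c :: t) 0).2.2 then
        (sp (c :: t) 0).1 ++ solA (sp (c :: t) 0).2.1
      else
        '(' :: (solA (sp (c :: t) 0).2.1 ++ [')']) ++
          (((sp (c :: t) 0).1.drop 1).dropLast).map flipc) := by
  have hlen := enum_eq (c :: t) 0 (by simp)
  have happ := sp_append (c :: t) 0
  have htake : (c :: t).take ((sp (c :: t) 0).1.length) = (sp (c :: t) 0).1 := by
    have h := List.take_left (l₁ := (sp (c :: t) 0).1) (l₂ := (sp (c :: t) 0).2.1)
    rw [happ] at h
    exact h
  have hdrop : (c :: t).drop ((sp (c :: t) 0).1.length) = (sp (c :: t) 0).2.1 := by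
    have h := List.drop_left (l₁ := (sp (c :: t) 0).1) (l₂ := (sp (c :: t) 0).2.1)
    rw [happ] at h
    exact h
  have hchk : chkAux [] (sp (c :: t) 0).1 = !(sp (c :: t) 0).2.2 := by
    rw [chkAux_eq_chkN]
    simpa using chk_sp (c :: t) 0 (le_refl 0)
  rw [solA]
  simp only [← hlen] at htake hdrop
  rw [htake, hdrop, hchk]
  by_cases hng : (sp (c :: t) 0).2.2
  · by_cases h2 : 2 < (sp (c :: t) 0).1.length
    · simp only [hng, Bool.not_true, Bool.false_eq_true, if_false, if_pos h2,
        PySem.List.foldl_append_singleton_eq_map]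
      rfl
    · rw [mid_nil (by omega)]
      simp [hng, h2]
  · simp [hng]

-- main invariant of B's outer loop
theorem loopB_inv : ∀ (n : Nat) (l : List Char), l.length ≤ n →
    ∀ (pre post : List (List Char)),
      (loopB l pre post).1.flatten ++ (loopB l pre post).2.reverse.flatten
        = pre.flatten ++ solA l ++ post.reverse.flatten := by
  intro n
  induction n with
  | zero =>
    intro l hl pre post
    have h0 : l = [] := List.eq_nil_of_length_eq_zero (by omega)
    subst h0
    simp [loopB, solA]
  | succ m ih =>
    intro l hl pre post
    cases l with
    | nil => simp [loopB, solA]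
    | cons c t =>
      have hinner := innerB_eq (c :: t) 0 false 0
      have happ := sp_append (c :: t) 0
      have hpos := sp_fst_len_pos c t 0
      have htake : (c :: t).take ((sp (c :: t) 0).1.length) = (sp (c :: t) 0).1 := by
        have h := List.take_left (l₁ := (sp (c :: t) 0).1) (l₂ := (sp (c :: t) 0).2.1)
        rw [happ] at h
        exact h
      have hdrop : (c :: t).drop ((sp (c :: t) 0).1.length) = (sp (c :: t) 0).2.1 := by
        have h := List.drop_left (l₁ := (sp (c :: t) 0).1) (l₂ := (sp (c :: t) 0).2.1)
        rw [happ] at h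
        exact h
      have hrest : (sp (c :: t) 0).2.1.length ≤ m := by
        have hsum : (sp (c :: t) 0).1.length + (sp (c :: t) 0).2.1.length = (c :: t).length := by
          rw [← List.length_append, happ]
        simp at hsum hl ⊢
        omega
      rw [loopB]
      simp only [hinner, Bool.false_or, Nat.zero_add, htake, hdrop, solA_cons]
      by_cases hng : (sp (c :: t) 0).2.2
      · rw [if_pos hng, if_neg (by simp [hng])]
        rw [ih _ hrest]
        simp [List.flatten_append, List.reverse_append]
      · have hs : (sp (c :: t) 0).2.2 = false := by simpa using hng
        rw [if_neg (by simp [hs]), if_pos (by simp [hs])]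
        rw [ih _ hrest]
        simp [List.flatten_append]

theorem solA_eq_solB (l : List Char) : solA l = solB l := by
  have h := loopB_inv l.length l (le_refl _) [] []
  simp [solB] at h ⊢
  rw [h]

-- ===== VERDICT (by name: the statement is the Claim_ definition above) =====
theorem solution_spec : Claim_equal_solution := by
  intro p _
  unfold Spec_solution solution solution_alt
  rw [solA_eq_solB]
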